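-- pv_equiv track=rewrite | github.com/raihanlanka/PikQueR | accounts/views.py | rankchecker
-- ===== SOURCE A (Python) =====
-- def rankchecker(profilescore):
--     profilescore=int(profilescore)
--     constant=0
--     for status in range(1,100):
--         lowrange=constant
--         constant=constant+40+(status*10)
--         if lowrange<= profilescore <=constant and round(profilescore,1)==profilescore:
--             return status
-- ===== SOURCE B (Python) =====
-- def rankchecker(profilescore):
--     # Closed-form bounds + binary search over the cumulative threshold T(s)=5*s*s+45*s,
--     # instead of A's linear scan with a running accumulator.
--     p = int(profilescore)
--     if p < 0 or p > 53460:
--         return None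
--     lo, hi = 1, 99
--     while lo < hi:
--         mid = (lo + hi) // 2
--         if p <= 5 * mid * mid + 45 * mid:
--             hi = mid
--         else:
--             lo = mid + 1
--     return lo
-- ===== Notes on version B (the rewrite author's own statement) =====
-- stated objective: alternative
-- what changed: Replaces A's linear scan with a running cumulative accumulator (and an always-true round() guard) by an explicit range check against the closed-form top threshold 53460 followed by a binary search for the smallest status s with profilescore <= 5*s*s+45*s.
import Mathlib
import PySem

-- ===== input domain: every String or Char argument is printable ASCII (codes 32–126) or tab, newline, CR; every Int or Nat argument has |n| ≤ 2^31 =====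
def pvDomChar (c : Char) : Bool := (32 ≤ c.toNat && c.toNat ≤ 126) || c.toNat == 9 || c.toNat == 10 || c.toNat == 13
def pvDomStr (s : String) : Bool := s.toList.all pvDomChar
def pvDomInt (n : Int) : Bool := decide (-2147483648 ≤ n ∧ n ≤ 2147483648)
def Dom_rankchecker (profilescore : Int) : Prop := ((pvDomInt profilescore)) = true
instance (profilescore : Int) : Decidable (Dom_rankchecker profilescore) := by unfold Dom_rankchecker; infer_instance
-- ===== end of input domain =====

-- B replaces A's 99-step linear scan (running accumulator, always-true round() guard on an int)
-- by a range check against the closed-form top threshold 53460 and a binary search for the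
-- smallest status s with profilescore ≤ 5*s*s + 45*s (objective: alternative algorithm).

-- ===== PORT A =====
-- the for-loop of A as structural recursion on `status`; `lowrange` is the incoming
-- `constant`, and `round(profilescore,1)==profilescore` is identically true on int, so the
-- guard is just the two inequalities.
def rankcheckerLoop (p status constant : Int) : Option Int :=
  if status < 100 then
    if constant ≤ p ∧ p ≤ constant + 40 + status * 10 then some status
    else rankcheckerLoop p (status + 1) (constant + 40 + status * 10)
  else none
termination_by (100 - status).toNat
decreasing_by omega

def rankchecker (profilescore : Int) : Option Int :=
  rankcheckerLoop profilescore 1 0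

-- ===== PORT B =====
-- the while-loop of Source B; `//` is Python floor division (PySem.Int.floordiv)
def bsearchLoop (p lo hi : Int) : Int :=
  if lo < hi then
    let mid := PySem.Int.floordiv (lo + hi) 2
    if p ≤ 5 * mid * mid + 45 * mid then bsearchLoop p lo mid
    else bsearchLoop p (mid + 1) hi
  else lo
termination_by (hi - lo).toNat
decreasing_by
  · have h := PySem.Int.floordiv_eq_ediv_of_pos (a := lo + hi) (b := 2) (by omega)
    simp only [h] at *; omega
  · have h := PySem.Int.floordiv_eq_ediv_of_pos (a := lo + hi) (b := 2) (by omega)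
    simp only [h] at *; omega

def rankchecker_alt (profilescore : Int) : Option Int :=
  let p := profilescore
  if p < 0 ∨ 53460 < p then none
  else some (bsearchLoop p 1 99)

-- ===== PRECONDITION & SPEC =====
def Spec_rankchecker (profilescore : Int) (out : Option Int) : Prop := out = rankchecker_alt profilescore
instance (profilescore : Int) (out : Option Int) : Decidable (Spec_rankchecker profilescore out) := by unfold Spec_rankchecker; infer_instance

-- ===== CLAIM (what is proved, stated in full; the proofs are below) =====
def Claim_equal_rankchecker : Prop := ∀ (profilescore : Int), Dom_rankchecker profilescore → Spec_rankchecker profilescore (rankchecker profilescore)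

-- ===== LEMMAS AND PROOFS =====

-- cumulative threshold of bucket s: T(s) = 5*s^2 + 45*s
def pvT (s : Int) : Int := 5 * s * s + 45 * s

theorem pvT_mono (a b : Int) (ha : 0 ≤ a) (hab : a ≤ b) : pvT a ≤ pvT b := by
  unfold pvT; nlinarith

theorem pvT_step (s : Int) : pvT (s - 1) + 40 + s * 10 = pvT s := by
  unfold pvT; ring

theorem pvT_top : pvT 99 = 53460 := by unfold pvT; norm_num

theorem bsearch_base (p lo hi : Int) (h : ¬ lo < hi) : bsearchLoop p lo hi = lo := by
  rw [bsearchLoop, if_neg h]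

theorem bsearch_step (p lo hi : Int) (h : lo < hi) :
    bsearchLoop p lo hi =
      if p ≤ 5 * ((lo + hi) / 2) * ((lo + hi) / 2) + 45 * ((lo + hi) / 2) then
        bsearchLoop p lo ((lo + hi) / 2)
      else bsearchLoop p ((lo + hi) / 2 + 1) hi := by
  rw [bsearchLoop, if_pos h, PySem.Int.floordiv_eq_ediv_of_pos (by norm_num)]

-- A's loop returns none for negative scores
theorem Aloop_neg (p : Int) (hp : p < 0) :
    ∀ (n : Nat) (s c : Int), (100 - s).toNat ≤ n → 1 ≤ s → 0 ≤ c →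
    rankcheckerLoop p s c = none := by
  intro n
  induction n with
  | zero =>
    intro s c hn hs hc
    rw [rankcheckerLoop, if_neg (by omega : ¬ s < 100)]
  | succ n ih =>
    intro s c hn hs hc
    by_cases h : s < 100
    · rw [rankcheckerLoop, if_pos h,
        if_neg (by omega : ¬ (c ≤ p ∧ p ≤ c + 40 + s * 10))]
      exact ih (s + 1) (c + 40 + s * 10) (by omega) (by omega) (by omega)
    · rw [rankcheckerLoop, if_neg h]

-- A's loop returns none for scores above the top threshold
theorem Aloop_big (p : Int) (hp : 53460 < p) :
    ∀ (n : Nat) (s c : Int), (100 - s).toNat ≤ n → 1 ≤ s → c = pvT (s - 1) →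
    rankcheckerLoop p s c = none := by
  intro n
  induction n with
  | zero =>
    intro s c hn hs hc
    rw [rankcheckerLoop, if_neg (by omega : ¬ s < 100)]
  | succ n ih =>
    intro s c hn hs hc
    by_cases h : s < 100
    · have hTs : c + 40 + s * 10 = pvT s := by rw [hc]; exact pvT_step s
      have hle : pvT s ≤ pvT 99 := pvT_mono s 99 (by omega) (by omega)
      rw [pvT_top] at hle
      rw [rankcheckerLoop, if_pos h,
        if_neg (by omega : ¬ (c ≤ p ∧ p ≤ c + 40 + s * 10))]
      exact ih (s + 1) (c + 40 + s * 10) (by omega) (by omega)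
        (by rw [hTs]; congr 1; omega)
    · rw [rankcheckerLoop, if_neg h]

-- A's loop finds the least in-range status at or above s
theorem Aloop_main (p : Int) (hp0 : 0 ≤ p) (hp1 : p ≤ 53460) :
    ∀ (n : Nat) (s : Int), (100 - s).toNat ≤ n → 1 ≤ s → s ≤ 99 → pvT (s - 1) ≤ p →
    ∃ r, rankcheckerLoop p s (pvT (s - 1)) = some r ∧ s ≤ r ∧ r ≤ 99 ∧ p ≤ pvT r ∧
      (r = s ∨ pvT (r - 1) < p) := by
  intro n
  induction n with
  | zero => intro s hn hs1 hs2 _; omega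
  | succ n ih =>
    intro s hn hs1 hs2 hlow
    have h : s < 100 := by omega
    have hTs : pvT (s - 1) + 40 + s * 10 = pvT s := pvT_step s
    by_cases hub : p ≤ pvT s
    · refine ⟨s, ?_, le_refl s, hs2, hub, Or.inl rfl⟩
      rw [rankcheckerLoop, if_pos h, if_pos (by omega : pvT (s - 1) ≤ p ∧ p ≤ pvT (s - 1) + 40 + s * 10)]
    · have hs99 : s ≤ 98 := by
        by_contra hc
        have hs' : s = 99 := by omega
        rw [hs', pvT_top] at hub; omega
      have hnext : pvT (s + 1 - 1) ≤ p := by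
        rw [(by omega : s + 1 - 1 = s)]; omega
      obtain ⟨r, hr, hr1, hr2, hr3, hr4⟩ :=
        ih (s + 1) (by omega) (by omega) (by omega) hnext
      refine ⟨r, ?_, by omega, hr2, hr3, Or.inr ?_⟩
      · rw [rankcheckerLoop, if_pos h,
          if_neg (by omega : ¬ (pvT (s - 1) ≤ p ∧ p ≤ pvT (s - 1) + 40 + s * 10)),
          hTs, (by congr 1; omega : pvT s = pvT (s + 1 - 1))]
        exact hr
      · rcases hr4 with h' | h'
        · rw [h', (by omega : s + 1 - 1 = s)]; omega
        · exact h'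

-- B's binary search finds the least in-range status in [lo, hi]
theorem Bloop_main (p : Int) :
    ∀ (n : Nat) (lo hi : Int), (hi - lo).toNat ≤ n → 1 ≤ lo → lo ≤ hi → hi ≤ 99 →
    p ≤ pvT hi → pvT (lo - 1) ≤ p →
    lo ≤ bsearchLoop p lo hi ∧ bsearchLoop p lo hi ≤ hi ∧ p ≤ pvT (bsearchLoop p lo hi) ∧
      (bsearchLoop p lo hi = lo ∨ pvT (bsearchLoop p lo hi - 1) < p) := by
  intro n
  induction n with
  | zero =>
    intro lo hi hn h1 h2 h3 hub hlb
    have heq : lo = hi := by omega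
    rw [bsearch_base p lo hi (by omega)]
    exact ⟨le_refl lo, by omega, heq ▸ hub, Or.inl rfl⟩
  | succ n ih =>
    intro lo hi hn h1 h2 h3 hub hlb
    by_cases hlt : lo < hi
    · have hb1 : lo ≤ (lo + hi) / 2 := by omega
      have hb2 : (lo + hi) / 2 < hi := by omega
      rw [bsearch_step p lo hi hlt]
      by_cases hc : p ≤ 5 * ((lo + hi) / 2) * ((lo + hi) / 2) + 45 * ((lo + hi) / 2)
      · rw [if_pos hc]
        have hub' : p ≤ pvT ((lo + hi) / 2) := hc
        obtain ⟨k1, k2, k3, k4⟩ :=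
          ih lo ((lo + hi) / 2) (by omega) h1 hb1 (by omega) hub' hlb
        exact ⟨k1, by omega, k3, k4⟩
      · rw [if_neg hc]
        have hlb' : pvT ((lo + hi) / 2 + 1 - 1) ≤ p := by
          rw [(by omega : (lo + hi) / 2 + 1 - 1 = (lo + hi) / 2)]
          exact le_of_lt (by unfold pvT; omega)
        obtain ⟨k1, k2, k3, k4⟩ :=
          ih ((lo + hi) / 2 + 1) hi (by omega) (by omega) (by omega) h3 hub hlb'
        refine ⟨by omega, k2, k3, Or.inr ?_⟩
        rcases k4 with h' | h'
        · rw [h', (by omega : (lo + hi) / 2 + 1 - 1 = (lo + hi) / 2)]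
          unfold pvT; unfold pvT at hc; omega
        · exact h'
    · have heq : lo = hi := by omega
      rw [bsearch_base p lo hi hlt]
      exact ⟨le_refl lo, by omega, heq ▸ hub, Or.inl rfl⟩

-- the least-bucket characterisation is unique
theorem pv_unique (p r1 r2 : Int)
    (h1a : 1 ≤ r1) (h1b : p ≤ pvT r1) (h1c : r1 = 1 ∨ pvT (r1 - 1) < p)
    (h2a : 1 ≤ r2) (h2b : p ≤ pvT r2) (h2c : r2 = 1 ∨ pvT (r2 - 1) < p) : r1 = r2 := by
  by_contra hne
  have aux : ∀ a b : Int, 1 ≤ a → p ≤ pvT a → 1 ≤ b → (b = 1 ∨ pvT (b - 1) < p) →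
      a < b → False := by
    intro a b ha hpa hb hbc hab
    rcases hbc with h' | h'
    · omega
    · have : pvT a ≤ pvT (b - 1) := pvT_mono a (b - 1) (by omega) (by omega)
      omega
  rcases lt_or_gt_of_ne hne with hlt | hgt
  · exact aux r1 r2 h1a h1b h2a h2c hlt
  · exact aux r2 r1 h2a h2b h1a h1c hgt

-- ===== VERDICT (by name: the statement is the Claim_ definition above) =====
theorem rankchecker_spec : Claim_equal_rankchecker := by
  intro p _
  unfold Spec_rankchecker rankchecker rankchecker_alt
  by_cases hneg : p < 0
  · rw [if_pos (Or.inl hneg)]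
    exact Aloop_neg p hneg 99 1 0 (by norm_num) (by norm_num) (by norm_num)
  · by_cases hbig : 53460 < p
    · rw [if_pos (Or.inr hbig)]
      exact Aloop_big p hbig 99 1 0 (by norm_num) (by norm_num)
        (by unfold pvT; norm_num)
    · rw [if_neg (by omega : ¬ (p < 0 ∨ 53460 < p))]
      have h0 : (0 : Int) = pvT (1 - 1) := by unfold pvT; norm_num
      obtain ⟨r, hr, _, hr2, hr3, hr4⟩ :=
        Aloop_main p (by omega) (by omega) 99 1 (by norm_num) (by norm_num)
          (by norm_num) (by rw [← h0]; omega)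
      obtain ⟨k1, k2, k3, k4⟩ :=
        Bloop_main p 98 1 99 (by norm_num) (by norm_num) (by norm_num) (by norm_num)
          (by rw [pvT_top]; omega) (by rw [← h0]; omega)
      rw [h0, hr]
      congr 1
      exact pv_unique p r (bsearchLoop p 1 99) (by omega) hr3 hr4 (by omega) k3 k4
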